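-- pv_equiv track=rewrite | github.com/Mesteriis/g160125-m-pt | 01 - Core python/Урок 21. Проектный урок/Anagrams/anagrams.py | is_valid_anagram
-- ===== SOURCE A (Python) =====
-- def is_valid_anagram(word, anagram):
--     if len(anagram) < 5:
--         return False
--
--     word_letters = list(word)
--     for letter in anagram:
--         if letter in word_letters:
--             word_letters.remove(letter)
--         else:
--             return False
--     return True
-- ===== SOURCE B (Python) =====
-- def is_valid_anagram(word, anagram):
--     if len(anagram) < 5:
--         return False
--     need = {}
--     for c in anagram:
--         need[c] = need.get(c, 0) + 1
--     have = {}
--     for c in word: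
--         have[c] = have.get(c, 0) + 1
--     return all(have.get(c, 0) >= n for c, n in need.items())
-- ===== Notes on version B (the rewrite author's own statement) =====
-- stated objective: faster
-- what changed: Replaces A's per-letter linear scan and remove on a copied letter list with two frequency dictionaries built in one pass each, compared at the end.
import Mathlib
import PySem

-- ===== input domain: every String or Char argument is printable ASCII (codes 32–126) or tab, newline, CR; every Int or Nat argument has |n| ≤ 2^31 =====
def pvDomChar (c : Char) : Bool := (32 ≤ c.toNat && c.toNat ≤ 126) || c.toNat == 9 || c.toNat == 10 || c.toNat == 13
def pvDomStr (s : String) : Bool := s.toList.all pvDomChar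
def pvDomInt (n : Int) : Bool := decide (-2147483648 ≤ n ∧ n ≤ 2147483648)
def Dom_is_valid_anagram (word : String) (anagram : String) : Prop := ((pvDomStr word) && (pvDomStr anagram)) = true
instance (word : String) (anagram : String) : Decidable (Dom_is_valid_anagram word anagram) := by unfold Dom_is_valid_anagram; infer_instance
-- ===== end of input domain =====

-- B replaces A's repeated membership-scan-and-remove loop by two one-pass frequency
-- dictionaries compared at the end (objective: faster, asymptotic).


-- ===== PORT A =====
-- the for-loop: membership test, then list.remove (first occurrence) = List.erase
def pvALoop : List Char → List Char → Bool
  | _, [] => true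
  | wl, c :: rest => if wl.contains c then pvALoop (wl.erase c) rest else false

def is_valid_anagram (word : String) (anagram : String) : Bool :=
  if PySem.Str.len anagram < 5 then false
  else pvALoop word.toList anagram.toList

-- ===== PORT B =====
-- need[c] = need.get(c, 0) + 1 counting loop
def pvCount (s : List Char) : PySem.Dict Char Int :=
  s.foldl (fun d c => d.insert c (d.getD c 0 + 1)) PySem.Dict.empty

def is_valid_anagram_alt (word : String) (anagram : String) : Bool :=
  if PySem.Str.len anagram < 5 then false
  else
    let need := pvCount anagram.toList
    let have_ := pvCount word.toList
    need.items.all (fun p => have_.getD p.1 0 ≥ p.2)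

-- ===== PRECONDITION & SPEC =====
def Spec_is_valid_anagram (word : String) (anagram : String) (out : Bool) : Prop := out = is_valid_anagram_alt word anagram
instance (word : String) (anagram : String) (out : Bool) : Decidable (Spec_is_valid_anagram word anagram out) := by unfold Spec_is_valid_anagram; infer_instance

-- ===== CLAIM (what is proved, stated in full; the proofs are below) =====
def Claim_equal_is_valid_anagram : Prop := ∀ (word : String) (anagram : String), Dom_is_valid_anagram word anagram → Spec_is_valid_anagram word anagram (is_valid_anagram word anagram)

-- ===== LEMMAS AND PROOFS =====

-- A's loop succeeds iff the anagram is a sub-multiset of the remaining letters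
lemma pvALoop_iff (a wl : List Char) :
    pvALoop wl a = true ↔ ∀ c, a.count c ≤ wl.count c := by
  induction a generalizing wl with
  | nil => simp [pvALoop]
  | cons c rest ih =>
    simp only [pvALoop]
    by_cases h : c ∈ wl
    · rw [if_pos (by simpa using h), ih]
      have hpos : 1 ≤ wl.count c := List.one_le_count_iff.mpr h
      constructor
      · intro hall d
        by_cases hdc : d = c
        · subst hdc
          have := hall d
          rw [List.count_cons_self]
          rw [List.count_erase_self] at this
          omega
        · have := hall d
          have h1 : List.count d (c :: rest) = List.count d rest := by have h2 : c ≠ d := Ne.symm hdc; simp [h2]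
          rw [h1, ← (List.count_erase_of_ne hdc :
            List.count d (wl.erase c) = List.count d wl)]
          exact this
      · intro hall d
        by_cases hdc : d = c
        · subst hdc
          have := hall d
          rw [List.count_cons_self] at this
          rw [List.count_erase_self]
          omega
        · have := hall d
          have h1 : List.count d (c :: rest) = List.count d rest := by have h2 : c ≠ d := Ne.symm hdc; simp [h2]
          rw [h1] at this
          rw [(List.count_erase_of_ne hdc :
            List.count d (wl.erase c) = List.count d wl)]
          exact this
    · rw [if_neg (by simpa using h)]
      constructor
      · intro hc; exact absurd hc (by simp)
      · intro hall
        have := hall c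
        rw [List.count_cons_self] at this
        have : 1 ≤ wl.count c := by omega
        exact absurd (List.one_le_count_iff.mp this) h

-- B's final check, through the Counter lemmas
lemma pvAlt_iff (a w : List Char) :
    ((pvCount a).items.all (fun p => (pvCount w).getD p.1 0 ≥ p.2)) = true
      ↔ ∀ c, a.count c ≤ w.count c := by
  have hcnt : pvCount a = PySem.Dict.counter a :=
    PySem.Dict.foldl_insert_getD_add_one_eq_counter a
  have hcntw : pvCount w = PySem.Dict.counter w :=
    PySem.Dict.foldl_insert_getD_add_one_eq_counter w
  rw [hcnt, hcntw, PySem.Dict.items_counter]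
  simp only [List.all_map, List.all_eq_true, Function.comp,
    PySem.Dict.getD_counter, ge_iff_le, decide_eq_true_eq]
  constructor
  · intro hall c
    by_cases hc : c ∈ a
    · have := hall c (by simpa using (PySem.Set.mem_ofList a c).mpr hc)
      exact_mod_cast this
    · simp [List.count_eq_zero_of_not_mem hc]
  · intro hall c _
    exact_mod_cast hall c

-- ===== VERDICT (by name: the statement is the Claim_ definition above) =====
theorem is_valid_anagram_spec : Claim_equal_is_valid_anagram := by
  intro word anagram _
  unfold Spec_is_valid_anagram is_valid_anagram is_valid_anagram_alt
  by_cases h : PySem.Str.len anagram < 5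
  · rw [if_pos h, if_pos h]
  · rw [if_neg h, if_neg h]
    exact Bool.eq_iff_iff.mpr
      ((pvALoop_iff anagram.toList word.toList).trans
        (pvAlt_iff anagram.toList word.toList).symm)
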